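-- pv_equiv track=rewrite | github.com/peter941221/Cogito | cogito/evolution/genome.py | prediction_param_count
-- ===== SOURCE A (Python) =====
-- def prediction_param_count(
--     input_dim: int,
--     hidden_dim: int,
--     depth: int,
--     output_dim: int,
-- ) -> int:
--     """Estimate parameters for prediction head MLP."""
--
--     if depth <= 0:
--         return 0
--
--     total = input_dim * hidden_dim + hidden_dim
--     for _ in range(depth - 1):
--         total += hidden_dim * hidden_dim + hidden_dim
--     total += hidden_dim * output_dim + output_dim
--     return total
-- ===== SOURCE B (Python) =====
-- def prediction_param_count(
--     input_dim: int,
--     hidden_dim: int,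
--     depth: int,
--     output_dim: int,
-- ) -> int:
--     """Count MLP head parameters by summing fan-in*fan-out + bias over the
--     explicit list of layer widths (a different decomposition from A's
--     per-layer accumulation loop)."""
--     if depth <= 0:
--         return 0
--     dims = [input_dim] + [hidden_dim] * depth + [output_dim]
--     return sum(a * b + b for a, b in zip(dims, dims[1:]))
-- ===== Notes on version B (the rewrite author's own statement) =====
-- stated objective: alternative
-- what changed: Instead of accumulating a running total over range(depth-1), B builds the explicit list of layer widths and sums fan_in*fan_out + bias over consecutive pairs of that list.
import Mathlib
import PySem

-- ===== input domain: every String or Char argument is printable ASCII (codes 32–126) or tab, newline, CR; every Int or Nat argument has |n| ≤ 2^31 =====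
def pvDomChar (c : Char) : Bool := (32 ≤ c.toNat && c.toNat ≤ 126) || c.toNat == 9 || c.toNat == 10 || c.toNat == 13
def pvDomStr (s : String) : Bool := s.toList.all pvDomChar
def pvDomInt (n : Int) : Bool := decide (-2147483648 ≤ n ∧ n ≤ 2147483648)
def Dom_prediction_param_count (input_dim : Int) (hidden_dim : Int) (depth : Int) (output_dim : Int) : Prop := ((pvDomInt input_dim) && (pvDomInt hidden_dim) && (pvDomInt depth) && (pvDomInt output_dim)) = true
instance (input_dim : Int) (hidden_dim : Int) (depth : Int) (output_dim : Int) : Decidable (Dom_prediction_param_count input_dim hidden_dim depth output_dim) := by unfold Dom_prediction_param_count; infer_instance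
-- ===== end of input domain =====

-- B sums fan_in*fan_out + bias over consecutive pairs of the explicit layer-width list,
-- instead of A's running-total loop; same cost, different decomposition.

-- ===== PORT A =====
-- Literal port of A: early return for depth <= 0, then a fold over range(depth-1).
def prediction_param_count (input_dim : Int) (hidden_dim : Int) (depth : Int) (output_dim : Int) : Int :=
  if depth ≤ 0 then 0
  else
    let total := input_dim * hidden_dim + hidden_dim
    let total := (PySem.List.pyRange 0 (depth - 1) 1).foldl
      (fun t _ => t + (hidden_dim * hidden_dim + hidden_dim)) total
    total + (hidden_dim * output_dim + output_dim)

-- ===== PORT B =====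
-- sum(a*b + b for a, b in zip(dims, dims[1:])): tail-recursive left-to-right sum
-- over consecutive pairs (prev carries dims[k], acc the running sum — exact on all inputs)
def pvPairSumGo (prev : Int) (acc : Int) : List Int → Int
  | [] => acc
  | b :: t => pvPairSumGo b (acc + (prev * b + b)) t
def pvPairSum : List Int → Int
  | [] => 0
  | a :: t => pvPairSumGo a 0 t

def prediction_param_count_alt (input_dim : Int) (hidden_dim : Int) (depth : Int) (output_dim : Int) : Int :=
  if depth ≤ 0 then 0
  else
    let dims := [input_dim] ++ List.replicate depth.toNat hidden_dim ++ [output_dim]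
    pvPairSum dims

-- ===== PRECONDITION & SPEC =====
def Spec_prediction_param_count (input_dim : Int) (hidden_dim : Int) (depth : Int) (output_dim : Int) (out : Int) : Prop := out = prediction_param_count_alt input_dim hidden_dim depth output_dim
instance (input_dim : Int) (hidden_dim : Int) (depth : Int) (output_dim : Int) (out : Int) : Decidable (Spec_prediction_param_count input_dim hidden_dim depth output_dim out) := by unfold Spec_prediction_param_count; infer_instance

-- ===== CLAIM (what is proved, stated in full; the proofs are below) =====
def Claim_equal_prediction_param_count : Prop := ∀ (input_dim : Int) (hidden_dim : Int) (depth : Int) (output_dim : Int), Dom_prediction_param_count input_dim hidden_dim depth output_dim → Spec_prediction_param_count input_dim hidden_dim depth output_dim (prediction_param_count input_dim hidden_dim depth output_dim)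

-- ===== LEMMAS AND PROOFS =====
-- Folding a constant addition over a list adds length * constant.
theorem foldl_const_add (l : List Int) (init c : Int) :
    l.foldl (fun t (_ : Int) => t + c) init = init + (l.length : Int) * c := by
  induction l generalizing init with
  | nil => simp
  | cons x xs ih => simp [List.foldl, ih]; ring

-- the accumulator of the pair-sum loop can be pulled out front
theorem pvPairSumGo_acc (prev acc : Int) (l : List Int) :
    pvPairSumGo prev acc l = acc + pvPairSumGo prev 0 l := by
  induction l generalizing prev acc with
  | nil => simp [pvPairSumGo]
  | cons b t ih => rw [pvPairSumGo, pvPairSumGo, ih, ih b (0 + _)]; ring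

theorem pvPairSum_cons_cons (a b : Int) (t : List Int) :
    pvPairSum (a :: b :: t) = (a * b + b) + pvPairSum (b :: t) := by
  simp only [pvPairSum, pvPairSumGo]
  rw [pvPairSumGo_acc]
  ring

-- B's pair sum over [i, h, …, h, o] with n+1 hiddens has the closed value.
theorem pvPairSum_layers (i h o : Int) (n : Nat) :
    pvPairSum ([i] ++ List.replicate (n + 1) h ++ [o])
      = (i * h + h) + (n : Int) * (h * h + h) + (h * o + o) := by
  induction n generalizing i with
  | zero => simp [pvPairSum, pvPairSumGo]
  | succ m ih =>
    have : ([i] ++ List.replicate (m + 2) h ++ [o])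
        = i :: ([h] ++ List.replicate (m + 1) h ++ [o]) := by
      simp [List.replicate_succ]
    rw [this]
    have h2 : ([h] ++ List.replicate (m + 1) h ++ [o])
        = h :: (List.replicate (m + 1) h ++ [o]) := by simp
    have := ih h
    rw [h2] at this ⊢
    have hcons : List.replicate (m + 1) h ++ [o] = h :: (List.replicate m h ++ [o]) := by
      simp [List.replicate_succ]
    rw [hcons] at this ⊢
    rw [pvPairSum_cons_cons, this]
    push_cast
    ring

-- ===== VERDICT (by name: the statement is the Claim_ definition above) =====
theorem prediction_param_count_spec : Claim_equal_prediction_param_count := by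
  intro input_dim hidden_dim depth output_dim _
  unfold Spec_prediction_param_count prediction_param_count prediction_param_count_alt
  by_cases h : depth ≤ 0
  · simp [h]
  · simp only [h, if_false]
    rw [foldl_const_add, PySem.List.length_pyRange_one]
    obtain ⟨n, hn⟩ : ∃ n : Nat, depth.toNat = n + 1 := ⟨depth.toNat - 1, by omega⟩
    rw [hn, pvPairSum_layers]
    have h1 : ((depth - 1 - 0).toNat : Int) = depth - 1 := by omega
    have h2 : (n : Int) = depth - 1 := by omega
    rw [h1, h2]
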